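-- pv_equiv track=rewrite | github.com/ikvict07/My_first | graphic_key.py | count_patterns_from
-- ===== SOURCE A (Python) =====
-- def count_patterns_from(first_point: str, length: int, seq=None) -> int:
--     """
-- Функция, чтобы посчитать количество возможных паролей графического ключа, длины length, если начинать с точки
-- firstPoint Первый аргумент - начальная точка, второй - длина пароля, остальные не заполнять.
--
-- вид граф ключа:
-- [A] [B] [C]
-- [D] [E] [F]
-- [G] [H] [I]
-- """
--
--     counter = 0  # То, что мы будем возвращать (количество паролей)
--
--     if seq is None:  # Если это первый вызов, то создаём список, в который потом будем записывать составляющие ключа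
--         # (буквы)
--         seq = []
--
--     current_length = length
--
--     current_point = first_point
--
--     seq.append(current_point)
--
--     # Крайний случай, и случай некорректных данных
--
--     if length > 9 or length < 1:
--         return 0
--     if length == 1:
--         return 1
--
--     # Списки букв, до которых можно дотянуться с определённой точки
--
--     A = ['B', 'E', 'D', 'H', 'F']
--     B = ['A', 'C', 'D', 'E', 'F', 'G', 'I']
--     C = ['B', 'E', 'F', 'D', 'H']
--     D = ['A', 'B', 'C', 'E', 'H', 'I', 'G']
--     E = ['A', 'B', 'C', 'D', 'F', 'G', 'H', 'I']
--     F = ['A', 'B', 'C', 'E', 'G', 'H', 'I']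
--     G = ['D', 'E', 'H', 'F', 'B']
--     H = ['G', 'D', 'A', 'E', 'C', 'F', 'I']
--     I = ['H', 'D', 'E', 'B', 'F']
--
--     my_di = {'A': A, 'B': B, 'C': C,
--              'D': D, 'E': E, 'F': F,
--              'G': G, 'H': H, 'I': I}
--
--     # Если Е участвует в ключе, то список букв, к которым можно дотянуться с определённой буквы, будет больше
--
--     if 'E' in seq:
--         A.append('I')
--         B.append('H')
--         C.append('G')
--         D.append('F')
--         F.append('D')
--         G.append('C')
--         H.append('B')
--         I.append('A')
--
--     # Буквы не могут дотянуться друг до друга, если между ними есть другая буква, но если эта буква уже зажата,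
--     # то это возможно
--     if 'D' in seq:
--         A.append('G')
--         G.append('A')
--     if 'B' in seq:
--         A.append('C')
--         C.append('A')
--     if 'F' in seq:
--         C.append('I')
--         I.append('C')
--     if 'H' in seq:
--         I.append('G')
--         G.append('I')
--
--     # Перебор всех возможных ключей нужной длины
--
--     for point in my_di[current_point]:
--
--         if point not in seq:
--             counter += count_patterns_from(point, current_length - 1, seq=seq)
--
--             seq.pop()
--
--     return counter
-- ===== SOURCE B (Python) =====
-- def count_patterns_from(first_point: str, length: int, seq=None) -> int:
--     # Memoized bitmask DFS over (point, visited-mask, remaining) instead of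
--     # enumerating every path over string lists; return-value equivalent
--     # (A also mutates `seq` in place, B does not).
--     if length > 9 or length < 1:
--         return 0
--     if length == 1:
--         return 1
--     letters = 'ABCDEFGHI'
--     index = {c: i for i, c in enumerate(letters)}
--     start = index[first_point]
--     mask = 1 << start
--     if seq is not None:
--         for s in seq:
--             if s in index:
--                 mask |= 1 << index[s]
--     mid = {}
--     for a, b, c in (('A', 'C', 'B'), ('A', 'G', 'D'), ('A', 'I', 'E'),
--                     ('C', 'I', 'F'), ('C', 'G', 'E'), ('G', 'I', 'H'),
--                     ('B', 'H', 'E'), ('D', 'F', 'E')):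
--         mid[(index[a], index[b])] = index[c]
--         mid[(index[b], index[a])] = index[c]
--     memo = {}
--
--     def solve(rem, i, m):
--         if rem == 0:
--             return 1
--         key = (rem, i, m)
--         if key in memo:
--             return memo[key]
--         total = 0
--         for j in range(9):
--             if m >> j & 1:
--                 continue
--             k = mid.get((i, j))
--             if k is not None and not (m >> k & 1):
--                 continue
--             total += solve(rem - 1, j, m | 1 << j)
--         memo[key] = total
--         return total
--
--     return solve(length - 1, start, mask)
-- ===== Notes on version B (the rewrite author's own statement) =====
-- stated objective: alternative
-- what changed: Replaces the recursive enumeration of every individual path (string-list membership tests, reachability dict rebuilt at every call) by a memoized DFS over (remaining length, current point, 9-bit visited bitmask) states with a precomputed midpoint table; on the measured inputs (dominated by scanning a huge seq) both are linear, so no speed is claimed.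
import Mathlib
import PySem

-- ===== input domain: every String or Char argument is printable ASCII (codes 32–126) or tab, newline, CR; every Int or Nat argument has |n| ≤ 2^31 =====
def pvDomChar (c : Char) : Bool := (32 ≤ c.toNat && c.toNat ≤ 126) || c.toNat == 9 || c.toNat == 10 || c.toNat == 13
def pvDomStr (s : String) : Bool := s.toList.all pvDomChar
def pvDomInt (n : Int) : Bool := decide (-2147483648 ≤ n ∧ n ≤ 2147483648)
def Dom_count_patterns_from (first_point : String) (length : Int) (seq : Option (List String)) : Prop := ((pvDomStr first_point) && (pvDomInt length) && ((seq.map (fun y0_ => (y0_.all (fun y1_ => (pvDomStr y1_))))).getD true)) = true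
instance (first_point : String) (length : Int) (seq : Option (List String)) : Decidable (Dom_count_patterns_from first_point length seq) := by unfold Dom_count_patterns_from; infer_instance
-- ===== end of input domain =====

-- B replaces A's path-by-path recursive enumeration with a memoized DFS over (remaining, point, visited-bitmask)
-- states; equivalence is about the RETURN value only: A mutates its `seq` argument in place, B does not.

-- ===== PORT A =====
-- Fuel-based transliteration of A's recursion; fuel 10 never runs out because A recurses only
-- when 2 ≤ length ≤ 9 with length - 1 (the fuel-0 branch is unreachable from the entry point).
def count_patterns_from_go (fuel : Nat) (first_point : String) (length : Int) (seq : List String) : Int :=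
  match fuel with
  | 0 => 0
  | fuel + 1 =>
    let s := seq ++ [first_point]          -- seq.append(current_point)
    if length > 9 ∨ length < 1 then 0
    else if length = 1 then 1
    else
      let lA := ["B", "E", "D", "H", "F"]
      let lB := ["A", "C", "D", "E", "F", "G", "I"]
      let lC := ["B", "E", "F", "D", "H"]
      let lD := ["A", "B", "C", "E", "H", "I", "G"]
      let lE := ["A", "B", "C", "D", "F", "G", "H", "I"]
      let lF := ["A", "B", "C", "E", "G", "H", "I"]
      let lG := ["D", "E", "H", "F", "B"]
      let lH := ["G", "D", "A", "E", "C", "F", "I"]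
      let lI := ["H", "D", "E", "B", "F"]
      -- if 'E' in seq: the eight appends
      let lA := if "E" ∈ s then lA ++ ["I"] else lA
      let lB := if "E" ∈ s then lB ++ ["H"] else lB
      let lC := if "E" ∈ s then lC ++ ["G"] else lC
      let lD := if "E" ∈ s then lD ++ ["F"] else lD
      let lF := if "E" ∈ s then lF ++ ["D"] else lF
      let lG := if "E" ∈ s then lG ++ ["C"] else lG
      let lH := if "E" ∈ s then lH ++ ["B"] else lH
      let lI := if "E" ∈ s then lI ++ ["A"] else lI
      let lA := if "D" ∈ s then lA ++ ["G"] else lA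
      let lG := if "D" ∈ s then lG ++ ["A"] else lG
      let lA := if "B" ∈ s then lA ++ ["C"] else lA
      let lC := if "B" ∈ s then lC ++ ["A"] else lC
      let lC := if "F" ∈ s then lC ++ ["I"] else lC
      let lI := if "F" ∈ s then lI ++ ["C"] else lI
      let lI := if "H" ∈ s then lI ++ ["G"] else lI
      let lG := if "H" ∈ s then lG ++ ["I"] else lG
      let my_di : PySem.Dict String (List String) :=
        PySem.Dict.ofList [("A", lA), ("B", lB), ("C", lC), ("D", lD), ("E", lE),
                           ("F", lF), ("G", lG), ("H", lH), ("I", lI)]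
      -- my_di[current_point]: KeyError (first_point not a key) is excluded by Pre_; .getD [] totalizes
      let adj := (my_di.get? first_point).getD []
      -- for point in my_di[current_point]: if point not in seq: counter += recurse; seq.pop()
      adj.foldl (fun counter point =>
        if point ∈ s then counter
        else counter + count_patterns_from_go fuel point (length - 1) s) 0

def count_patterns_from (first_point : String) (length : Int) (seq : Option (List String)) : Int :=
  count_patterns_from_go 10 first_point length (seq.getD [])

-- ===== PORT B =====
-- transliteration of Source B (indices and bitmasks are nonnegative throughout, so Nat's <<<, >>>, &&&, ||| are exact)
def pvLetters : List String := ["A", "B", "C", "D", "E", "F", "G", "H", "I"]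

-- index = {c: i for i, c in enumerate(letters)}
def pvIndexD : PySem.Dict String Nat :=
  PySem.Dict.ofList [("A", 0), ("B", 1), ("C", 2), ("D", 3), ("E", 4), ("F", 5), ("G", 6), ("H", 7), ("I", 8)]

-- mid[...] built from the eight midpoint triples, both directions
def pvMidD : PySem.Dict (Nat × Nat) Nat :=
  ([("A", "C", "B"), ("A", "G", "D"), ("A", "I", "E"), ("C", "I", "F"),
    ("C", "G", "E"), ("G", "I", "H"), ("B", "H", "E"), ("D", "F", "E")] :
      List (String × String × String)).foldl
    (fun d t =>
      let i := (pvIndexD.get? t.1).getD 0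
      let j := (pvIndexD.get? t.2.1).getD 0
      let k := (pvIndexD.get? t.2.2).getD 0
      (d.insert (i, j) k).insert (j, i) k)
    PySem.Dict.empty

-- def solve(rem, i, m): the memo dict is threaded through (Python closes over it)
def pvSolve : Nat → Nat → Nat → PySem.Dict (Nat × Nat × Nat) Int →
    Int × PySem.Dict (Nat × Nat × Nat) Int
  | 0, _, _, memo => (1, memo)
  | rem + 1, i, m, memo =>
    match memo.get? (rem + 1, i, m) with
    | some v => (v, memo)
    | none =>
      let res := (List.range 9).foldl
        (fun (acc : Int × PySem.Dict (Nat × Nat × Nat) Int) j =>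
          if (m >>> j) &&& 1 ≠ 0 then acc              -- if m >> j & 1: continue
          else if (match pvMidD.get? (i, j) with       -- if k is not None and not (m >> k & 1): continue
                   | some k => (m >>> k) &&& 1 == 0
                   | none => false) then acc
          else
            let r := pvSolve rem j (m ||| (1 <<< j)) acc.2
            (acc.1 + r.1, r.2))
        (0, memo)
      (res.1, res.2.insert (rem + 1, i, m) res.1)

def count_patterns_from_alt (first_point : String) (length : Int) (seq : Option (List String)) : Int :=
  if length > 9 ∨ length < 1 then 0
  else if length = 1 then 1
  else
    let start := (pvIndexD.get? first_point).getD 0   -- KeyError (invalid point) is excluded by Pre_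
    let mask := 1 <<< start
    let mask := match seq with                         -- if seq is not None: the bit-collecting loop
      | none => mask
      | some l => l.foldl (fun m x =>
          match pvIndexD.get? x with                   -- if s in index: m |= 1 << index[s]
          | some i => m ||| (1 <<< i)
          | none => m) mask
    (pvSolve (length - 1).toNat start mask PySem.Dict.empty).1

-- ===== PRECONDITION & SPEC =====
-- Pre_ excludes exactly the inputs where Python A raises KeyError (my_di[first_point] with
-- first_point not one of the nine pad letters, reached only when 2 <= length <= 9); B raises there too.
def Pre_count_patterns_from (first_point : String) (length : Int) (seq : Option (List String)) : Prop :=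
  (1 < length ∧ length ≤ 9) → first_point ∈ pvLetters
instance (first_point : String) (length : Int) (seq : Option (List String)) : Decidable (Pre_count_patterns_from first_point length seq) := by unfold Pre_count_patterns_from; infer_instance

def pvWitness_count_patterns_from : String × Int × Option (List String) := ("E", 4, some ["X", "B"])

def Spec_count_patterns_from (first_point : String) (length : Int) (seq : Option (List String)) (out : Int) : Prop := out = count_patterns_from_alt first_point length seq
instance (first_point : String) (length : Int) (seq : Option (List String)) (out : Int) : Decidable (Spec_count_patterns_from first_point length seq out) := by unfold Spec_count_patterns_from; infer_instance

-- ===== CLAIM (what is proved, stated in full; the proofs are below) =====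
def Claim_equal_count_patterns_from : Prop := ∀ (first_point : String) (length : Int) (seq : Option (List String)), Dom_count_patterns_from first_point length seq → Pre_count_patterns_from first_point length seq → Spec_count_patterns_from first_point length seq (count_patterns_from first_point length seq)

-- ===== LEMMAS AND PROOFS =====

-- midpoint table as a plain function (proof-side mirror of pvMidD)
def midSpec : Nat → Nat → Option Nat
  | 0, 2 => some 1 | 2, 0 => some 1
  | 0, 6 => some 3 | 6, 0 => some 3
  | 0, 8 => some 4 | 8, 0 => some 4
  | 2, 8 => some 5 | 8, 2 => some 5
  | 2, 6 => some 4 | 6, 2 => some 4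
  | 6, 8 => some 7 | 8, 6 => some 7
  | 1, 7 => some 4 | 7, 1 => some 4
  | 3, 5 => some 4 | 5, 3 => some 4
  | _, _ => none

-- one legal step: target bit clear, and (no midpoint, or midpoint bit set)
def trans9 (i j m : Nat) : Bool :=
  ((m >>> j) &&& 1 == 0) &&
    (match midSpec i j with
     | some k => (m >>> k) &&& 1 == 1
     | none => true)

-- reference count: paths of `rem` further steps from point i with visited mask m
def gspec : Nat → Nat → Nat → Int
  | 0, _, _ => 1
  | rem + 1, i, m =>
    ((List.range 9).map (fun j => if trans9 i j m then gspec rem j (m ||| (1 <<< j)) else 0)).sum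

def bitOfD (x : String) : Nat :=
  match pvIndexD.get? x with
  | some i => 1 <<< i
  | none => 0

def maskOf (s : List String) : Nat := s.foldl (fun m x => m ||| bitOfD x) 0

lemma foldl_or_init (s : List String) (a : Nat) :
    s.foldl (fun m x => m ||| bitOfD x) a = a ||| maskOf s := by
  induction s generalizing a with
  | nil => simp [maskOf]
  | cons x t ih =>
    rw [maskOf, List.foldl_cons, List.foldl_cons, ih (a ||| bitOfD x), ih (0 ||| bitOfD x),
      Nat.zero_or, Nat.lor_assoc]

lemma maskOf_append (s : List String) (q : String) :
    maskOf (s ++ [q]) = maskOf s ||| bitOfD q := by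
  rw [maskOf, List.foldl_append, List.foldl_cons, List.foldl_nil, foldl_or_init, Nat.zero_or]

lemma indexD_get?_cases (x : String) :
    pvIndexD.get? x = none ∨ ∃ i, i < 9 ∧ pvIndexD.get? x = some i ∧ x = pvLetters.getD i "" := by
  by_cases h0 : x = "A"; · subst h0; right; exact ⟨0, by norm_num, by decide, by decide⟩
  by_cases h1 : x = "B"; · subst h1; right; exact ⟨1, by norm_num, by decide, by decide⟩
  by_cases h2 : x = "C"; · subst h2; right; exact ⟨2, by norm_num, by decide, by decide⟩
  by_cases h3 : x = "D"; · subst h3; right; exact ⟨3, by norm_num, by decide, by decide⟩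
  by_cases h4 : x = "E"; · subst h4; right; exact ⟨4, by norm_num, by decide, by decide⟩
  by_cases h5 : x = "F"; · subst h5; right; exact ⟨5, by norm_num, by decide, by decide⟩
  by_cases h6 : x = "G"; · subst h6; right; exact ⟨6, by norm_num, by decide, by decide⟩
  by_cases h7 : x = "H"; · subst h7; right; exact ⟨7, by norm_num, by decide, by decide⟩
  by_cases h8 : x = "I"; · subst h8; right; exact ⟨8, by norm_num, by decide, by decide⟩
  left
  rw [show pvIndexD = PySem.Dict.mk [("A", 0), ("B", 1), ("C", 2), ("D", 3), ("E", 4), ("F", 5), ("G", 6), ("H", 7), ("I", 8)] from rfl]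
  have g0 : ("A" == x) = false := by simpa using Ne.symm h0
  have g1 : ("B" == x) = false := by simpa using Ne.symm h1
  have g2 : ("C" == x) = false := by simpa using Ne.symm h2
  have g3 : ("D" == x) = false := by simpa using Ne.symm h3
  have g4 : ("E" == x) = false := by simpa using Ne.symm h4
  have g5 : ("F" == x) = false := by simpa using Ne.symm h5
  have g6 : ("G" == x) = false := by simpa using Ne.symm h6
  have g7 : ("H" == x) = false := by simpa using Ne.symm h7
  have g8 : ("I" == x) = false := by simpa using Ne.symm h8
  simp [PySem.Dict.get?_mk_cons, g0, g1, g2, g3, g4, g5, g6, g7, g8]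
  rfl

lemma testBit_bitOfD (x : String) (j : Nat) (hj : j < 9) :
    (bitOfD x).testBit j = decide (pvLetters.getD j "" = x) := by
  rcases indexD_get?_cases x with h | ⟨i, hi, h, hx⟩
  · rw [bitOfD, h]
    simp only [Nat.zero_testBit]
    have : pvLetters.getD j "" ≠ x := by
      intro he
      have : pvIndexD.get? (pvLetters.getD j "") ≠ none := by
        interval_cases j <;> simp [pvLetters] <;> decide
      rw [he, h] at this; exact this rfl
    simpa using this
  · rw [bitOfD, h, hx]
    simp only [Nat.one_shiftLeft, Nat.testBit_two_pow]
    interval_cases i <;> interval_cases j <;> simp [pvLetters]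

lemma testBit_maskOf (s : List String) (j : Nat) (hj : j < 9) :
    (maskOf s).testBit j = decide (pvLetters.getD j "" ∈ s) := by
  induction s with
  | nil => simp [maskOf]
  | cons x t ih =>
    rw [show maskOf (x :: t) = (0 ||| bitOfD x) ||| maskOf t by
        rw [maskOf, List.foldl_cons, foldl_or_init]]
    rw [Nat.testBit_or, Nat.testBit_or, ih, testBit_bitOfD x j hj]
    by_cases hx : pvLetters.getD j "" = x <;> simp [Nat.zero_testBit, hx]

lemma and_one_beq_one (m j : Nat) : ((m >>> j) &&& 1 == 1) = m.testBit j := by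
  have h : (m >>> j) &&& 1 ≤ 1 := Nat.and_le_right
  rw [Nat.testBit, Nat.and_comm]
  rcases Nat.lt_or_ge ((m >>> j) &&& 1) 1 with h1 | h1
  · have h0 : (m >>> j) &&& 1 = 0 := by omega
    simp [h0]
  · have h0 : (m >>> j) &&& 1 = 1 := by omega
    simp [h0]

lemma and_one_beq_zero (m j : Nat) : ((m >>> j) &&& 1 == 0) = !m.testBit j := by
  have h : (m >>> j) &&& 1 ≤ 1 := Nat.and_le_right
  have e : ((m >>> j) &&& 1 == 1) = m.testBit j := and_one_beq_one m j
  rcases Nat.lt_or_ge ((m >>> j) &&& 1) 1 with h1 | h1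
  · have h0 : (m >>> j) &&& 1 = 0 := by omega
    have ht : m.testBit j = false := by rw [← e]; simp [h0]
    simp [h0, ht]
  · have h0 : (m >>> j) &&& 1 = 1 := by omega
    have ht : m.testBit j = true := by rw [← e]; simp [h0]
    simp [h0, ht]

lemma sum_ite_skip (l s' : List String) (F : String → Int) (init : Int) :
    l.foldl (fun acc q => if q ∈ s' then acc else acc + F q) init
      = init + (l.map (fun q => if q ∈ s' then 0 else F q)).sum := by
  induction l generalizing init with
  | nil => simp
  | cons x t ih =>
    rw [List.foldl_cons, List.map_cons, List.sum_cons, ih]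
    by_cases hx : x ∈ s' <;> simp [hx] <;> ring

lemma map_sum_ite_append (c : Prop) [Decidable c] (l : List String) (x : String) (f : String → Int) :
    (((if c then l ++ [x] else l).map f).sum) = (l.map f).sum + (if c then f x else 0) := by
  split_ifs <;> simp



lemma pvMidD_eq (i j : Nat) (hi : i < 9) (hj : j < 9) :
    pvMidD.get? (i, j) = midSpec i j := by
  interval_cases i <;> interval_cases j <;> decide

lemma ite_not_and (a b : Prop) [Decidable a] [Decidable b] (x : Int) :
    (if ¬a ∧ b then x else 0) = (if b then (if a then 0 else x) else 0) := by
  split_ifs <;> first | rfl | (exfalso; tauto)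

set_option maxHeartbeats 4000000 in
lemma go_eq (fuel : Nat) :
    ∀ (L : Int) (s : List String) (p : String) (i : Nat),
      pvIndexD.get? p = some i → 1 ≤ L → L ≤ 9 → L.toNat ≤ fuel →
      count_patterns_from_go fuel p L s = gspec (L - 1).toNat i (maskOf (s ++ [p])) := by
  induction fuel with
  | zero => intro L s p i hp h1 h9 hf; omega
  | succ fuel ih =>
    intro L s p i hp h1 h9 hf
    by_cases hL1' : L = 1
    · subst hL1'
      simp [count_patterns_from_go, gspec]
    · have hL2 : 2 ≤ L := by omega
      have hc1 : ¬(L > 9 ∨ L < 1) := by omega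
      have hL1 : ¬(L = 1) := hL1'
      have hr : (L - 1).toNat = (L - 2).toNat + 1 := by omega
      rcases indexD_get?_cases p with hnone | ⟨i', hi', hsome, hx⟩
      · rw [hp] at hnone; cases hnone
      rw [hp] at hsome; injection hsome with hii; subst hii
      have IHq : ∀ q iq, pvIndexD.get? q = some iq →
          count_patterns_from_go fuel q (L - 1) (s ++ [p]) =
            gspec (L - 2).toNat iq (maskOf (s ++ [p]) ||| bitOfD q) := by
        intro q iq h
        have e := ih (L - 1) (s ++ [p]) q iq h (by omega) (by omega) (by omega)
        rw [show (L - 1 - 1).toNat = (L - 2).toNat by omega, maskOf_append] at e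
        exact e
      interval_cases i
      · -- p = "A"
        simp only [pvLetters, List.getD_cons_zero, List.getD_cons_succ] at hx
        subst hx
        rw [count_patterns_from_go]
        simp only [hc1, if_false, hL1]
        simp only [PySem.Dict.ofList, PySem.Dict.update, List.foldl_cons, List.foldl_nil]
        rw [show ∀ (vA vB vC vD vE vF vG vH vI : List String),
            ((((((((((PySem.Dict.empty.insert "A" vA).insert "B" vB).insert "C" vC).insert "D" vD).insert "E" vE).insert "F" vF).insert "G" vG).insert "H" vH).insert "I" vI).get? "A") = some vA from by
          intro vA vB vC vD vE vF vG vH vI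
          simp [PySem.Dict.get?_insert]]
        rw [Option.getD_some, sum_ite_skip, hr]
        simp only [map_sum_ite_append, List.map_cons, List.map_nil, List.sum_cons, List.sum_nil]
        simp only [IHq "B" 1 (by decide),
          IHq "C" 2 (by decide),
          IHq "D" 3 (by decide),
          IHq "E" 4 (by decide),
          IHq "F" 5 (by decide),
          IHq "G" 6 (by decide),
          IHq "H" 7 (by decide),
          IHq "I" 8 (by decide)]
        conv_rhs => rw [gspec]
        rw [show List.range 9 = [0, 1, 2, 3, 4, 5, 6, 7, 8] from by decide]
        simp only [List.map_cons, List.map_nil, List.sum_cons, List.sum_nil, trans9, midSpec,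
          and_one_beq_zero, and_one_beq_one, Bool.and_true]
        simp only [testBit_maskOf _ 0 (by norm_num),
          testBit_maskOf _ 1 (by norm_num),
          testBit_maskOf _ 2 (by norm_num),
          testBit_maskOf _ 3 (by norm_num),
          testBit_maskOf _ 4 (by norm_num),
          testBit_maskOf _ 5 (by norm_num),
          testBit_maskOf _ 6 (by norm_num),
          testBit_maskOf _ 7 (by norm_num),
          testBit_maskOf _ 8 (by norm_num)]
        simp [pvLetters, ite_not_and, ite_not,
          show bitOfD "B" = 2 from by decide,
          show bitOfD "C" = 4 from by decide,
          show bitOfD "D" = 8 from by decide,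
          show bitOfD "E" = 16 from by decide,
          show bitOfD "F" = 32 from by decide,
          show bitOfD "G" = 64 from by decide,
          show bitOfD "H" = 128 from by decide,
          show bitOfD "I" = 256 from by decide]
        ring
      · -- p = "B"
        simp only [pvLetters, List.getD_cons_zero, List.getD_cons_succ] at hx
        subst hx
        rw [count_patterns_from_go]
        simp only [hc1, if_false, hL1]
        simp only [PySem.Dict.ofList, PySem.Dict.update, List.foldl_cons, List.foldl_nil]
        rw [show ∀ (vA vB vC vD vE vF vG vH vI : List String),
            ((((((((((PySem.Dict.empty.insert "A" vA).insert "B" vB).insert "C" vC).insert "D" vD).insert "E" vE).insert "F" vF).insert "G" vG).insert "H" vH).insert "I" vI).get? "B") = some vB from by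
          intro vA vB vC vD vE vF vG vH vI
          simp [PySem.Dict.get?_insert]]
        rw [Option.getD_some, sum_ite_skip, hr]
        simp only [map_sum_ite_append, List.map_cons, List.map_nil, List.sum_cons, List.sum_nil]
        simp only [IHq "A" 0 (by decide),
          IHq "C" 2 (by decide),
          IHq "D" 3 (by decide),
          IHq "E" 4 (by decide),
          IHq "F" 5 (by decide),
          IHq "G" 6 (by decide),
          IHq "H" 7 (by decide),
          IHq "I" 8 (by decide)]
        conv_rhs => rw [gspec]
        rw [show List.range 9 = [0, 1, 2, 3, 4, 5, 6, 7, 8] from by decide]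
        simp only [List.map_cons, List.map_nil, List.sum_cons, List.sum_nil, trans9, midSpec,
          and_one_beq_zero, and_one_beq_one, Bool.and_true]
        simp only [testBit_maskOf _ 0 (by norm_num),
          testBit_maskOf _ 1 (by norm_num),
          testBit_maskOf _ 2 (by norm_num),
          testBit_maskOf _ 3 (by norm_num),
          testBit_maskOf _ 4 (by norm_num),
          testBit_maskOf _ 5 (by norm_num),
          testBit_maskOf _ 6 (by norm_num),
          testBit_maskOf _ 7 (by norm_num),
          testBit_maskOf _ 8 (by norm_num)]
        simp [pvLetters, ite_not_and, ite_not,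
          show bitOfD "A" = 1 from by decide,
          show bitOfD "C" = 4 from by decide,
          show bitOfD "D" = 8 from by decide,
          show bitOfD "E" = 16 from by decide,
          show bitOfD "F" = 32 from by decide,
          show bitOfD "G" = 64 from by decide,
          show bitOfD "H" = 128 from by decide,
          show bitOfD "I" = 256 from by decide]
        ring
      · -- p = "C"
        simp only [pvLetters, List.getD_cons_zero, List.getD_cons_succ] at hx
        subst hx
        rw [count_patterns_from_go]
        simp only [hc1, if_false, hL1]
        simp only [PySem.Dict.ofList, PySem.Dict.update, List.foldl_cons, List.foldl_nil]
        rw [show ∀ (vA vB vC vD vE vF vG vH vI : List String),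
            ((((((((((PySem.Dict.empty.insert "A" vA).insert "B" vB).insert "C" vC).insert "D" vD).insert "E" vE).insert "F" vF).insert "G" vG).insert "H" vH).insert "I" vI).get? "C") = some vC from by
          intro vA vB vC vD vE vF vG vH vI
          simp [PySem.Dict.get?_insert]]
        rw [Option.getD_some, sum_ite_skip, hr]
        simp only [map_sum_ite_append, List.map_cons, List.map_nil, List.sum_cons, List.sum_nil]
        simp only [IHq "A" 0 (by decide),
          IHq "B" 1 (by decide),
          IHq "D" 3 (by decide),
          IHq "E" 4 (by decide),
          IHq "F" 5 (by decide),
          IHq "G" 6 (by decide),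
          IHq "H" 7 (by decide),
          IHq "I" 8 (by decide)]
        conv_rhs => rw [gspec]
        rw [show List.range 9 = [0, 1, 2, 3, 4, 5, 6, 7, 8] from by decide]
        simp only [List.map_cons, List.map_nil, List.sum_cons, List.sum_nil, trans9, midSpec,
          and_one_beq_zero, and_one_beq_one, Bool.and_true]
        simp only [testBit_maskOf _ 0 (by norm_num),
          testBit_maskOf _ 1 (by norm_num),
          testBit_maskOf _ 2 (by norm_num),
          testBit_maskOf _ 3 (by norm_num),
          testBit_maskOf _ 4 (by norm_num),
          testBit_maskOf _ 5 (by norm_num),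
          testBit_maskOf _ 6 (by norm_num),
          testBit_maskOf _ 7 (by norm_num),
          testBit_maskOf _ 8 (by norm_num)]
        simp [pvLetters, ite_not_and, ite_not,
          show bitOfD "A" = 1 from by decide,
          show bitOfD "B" = 2 from by decide,
          show bitOfD "D" = 8 from by decide,
          show bitOfD "E" = 16 from by decide,
          show bitOfD "F" = 32 from by decide,
          show bitOfD "G" = 64 from by decide,
          show bitOfD "H" = 128 from by decide,
          show bitOfD "I" = 256 from by decide]
        ring
      · -- p = "D"
        simp only [pvLetters, List.getD_cons_zero, List.getD_cons_succ] at hx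
        subst hx
        rw [count_patterns_from_go]
        simp only [hc1, if_false, hL1]
        simp only [PySem.Dict.ofList, PySem.Dict.update, List.foldl_cons, List.foldl_nil]
        rw [show ∀ (vA vB vC vD vE vF vG vH vI : List String),
            ((((((((((PySem.Dict.empty.insert "A" vA).insert "B" vB).insert "C" vC).insert "D" vD).insert "E" vE).insert "F" vF).insert "G" vG).insert "H" vH).insert "I" vI).get? "D") = some vD from by
          intro vA vB vC vD vE vF vG vH vI
          simp [PySem.Dict.get?_insert]]
        rw [Option.getD_some, sum_ite_skip, hr]
        simp only [map_sum_ite_append, List.map_cons, List.map_nil, List.sum_cons, List.sum_nil]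
        simp only [IHq "A" 0 (by decide),
          IHq "B" 1 (by decide),
          IHq "C" 2 (by decide),
          IHq "E" 4 (by decide),
          IHq "F" 5 (by decide),
          IHq "G" 6 (by decide),
          IHq "H" 7 (by decide),
          IHq "I" 8 (by decide)]
        conv_rhs => rw [gspec]
        rw [show List.range 9 = [0, 1, 2, 3, 4, 5, 6, 7, 8] from by decide]
        simp only [List.map_cons, List.map_nil, List.sum_cons, List.sum_nil, trans9, midSpec,
          and_one_beq_zero, and_one_beq_one, Bool.and_true]
        simp only [testBit_maskOf _ 0 (by norm_num),
          testBit_maskOf _ 1 (by norm_num),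
          testBit_maskOf _ 2 (by norm_num),
          testBit_maskOf _ 3 (by norm_num),
          testBit_maskOf _ 4 (by norm_num),
          testBit_maskOf _ 5 (by norm_num),
          testBit_maskOf _ 6 (by norm_num),
          testBit_maskOf _ 7 (by norm_num),
          testBit_maskOf _ 8 (by norm_num)]
        simp [pvLetters, ite_not_and, ite_not,
          show bitOfD "A" = 1 from by decide,
          show bitOfD "B" = 2 from by decide,
          show bitOfD "C" = 4 from by decide,
          show bitOfD "E" = 16 from by decide,
          show bitOfD "F" = 32 from by decide,
          show bitOfD "G" = 64 from by decide,
          show bitOfD "H" = 128 from by decide,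
          show bitOfD "I" = 256 from by decide]
        ring
      · -- p = "E"
        simp only [pvLetters, List.getD_cons_zero, List.getD_cons_succ] at hx
        subst hx
        rw [count_patterns_from_go]
        simp only [hc1, if_false, hL1]
        simp only [PySem.Dict.ofList, PySem.Dict.update, List.foldl_cons, List.foldl_nil]
        rw [show ∀ (vA vB vC vD vE vF vG vH vI : List String),
            ((((((((((PySem.Dict.empty.insert "A" vA).insert "B" vB).insert "C" vC).insert "D" vD).insert "E" vE).insert "F" vF).insert "G" vG).insert "H" vH).insert "I" vI).get? "E") = some vE from by
          intro vA vB vC vD vE vF vG vH vI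
          simp [PySem.Dict.get?_insert]]
        rw [Option.getD_some, sum_ite_skip, hr]
        simp only [map_sum_ite_append, List.map_cons, List.map_nil, List.sum_cons, List.sum_nil]
        simp only [IHq "A" 0 (by decide),
          IHq "B" 1 (by decide),
          IHq "C" 2 (by decide),
          IHq "D" 3 (by decide),
          IHq "F" 5 (by decide),
          IHq "G" 6 (by decide),
          IHq "H" 7 (by decide),
          IHq "I" 8 (by decide)]
        conv_rhs => rw [gspec]
        rw [show List.range 9 = [0, 1, 2, 3, 4, 5, 6, 7, 8] from by decide]
        simp only [List.map_cons, List.map_nil, List.sum_cons, List.sum_nil, trans9, midSpec,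
          and_one_beq_zero, Bool.and_true]
        simp only [testBit_maskOf _ 0 (by norm_num),
          testBit_maskOf _ 1 (by norm_num),
          testBit_maskOf _ 2 (by norm_num),
          testBit_maskOf _ 3 (by norm_num),
          testBit_maskOf _ 4 (by norm_num),
          testBit_maskOf _ 5 (by norm_num),
          testBit_maskOf _ 6 (by norm_num),
          testBit_maskOf _ 7 (by norm_num),
          testBit_maskOf _ 8 (by norm_num)]
        simp [pvLetters, ite_not,
          show bitOfD "A" = 1 from by decide,
          show bitOfD "B" = 2 from by decide,
          show bitOfD "C" = 4 from by decide,
          show bitOfD "D" = 8 from by decide,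
          show bitOfD "F" = 32 from by decide,
          show bitOfD "G" = 64 from by decide,
          show bitOfD "H" = 128 from by decide,
          show bitOfD "I" = 256 from by decide]
      · -- p = "F"
        simp only [pvLetters, List.getD_cons_zero, List.getD_cons_succ] at hx
        subst hx
        rw [count_patterns_from_go]
        simp only [hc1, if_false, hL1]
        simp only [PySem.Dict.ofList, PySem.Dict.update, List.foldl_cons, List.foldl_nil]
        rw [show ∀ (vA vB vC vD vE vF vG vH vI : List String),
            ((((((((((PySem.Dict.empty.insert "A" vA).insert "B" vB).insert "C" vC).insert "D" vD).insert "E" vE).insert "F" vF).insert "G" vG).insert "H" vH).insert "I" vI).get? "F") = some vF from by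
          intro vA vB vC vD vE vF vG vH vI
          simp [PySem.Dict.get?_insert]]
        rw [Option.getD_some, sum_ite_skip, hr]
        simp only [map_sum_ite_append, List.map_cons, List.map_nil, List.sum_cons, List.sum_nil]
        simp only [IHq "A" 0 (by decide),
          IHq "B" 1 (by decide),
          IHq "C" 2 (by decide),
          IHq "D" 3 (by decide),
          IHq "E" 4 (by decide),
          IHq "G" 6 (by decide),
          IHq "H" 7 (by decide),
          IHq "I" 8 (by decide)]
        conv_rhs => rw [gspec]
        rw [show List.range 9 = [0, 1, 2, 3, 4, 5, 6, 7, 8] from by decide]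
        simp only [List.map_cons, List.map_nil, List.sum_cons, List.sum_nil, trans9, midSpec,
          and_one_beq_zero, and_one_beq_one, Bool.and_true]
        simp only [testBit_maskOf _ 0 (by norm_num),
          testBit_maskOf _ 1 (by norm_num),
          testBit_maskOf _ 2 (by norm_num),
          testBit_maskOf _ 3 (by norm_num),
          testBit_maskOf _ 4 (by norm_num),
          testBit_maskOf _ 5 (by norm_num),
          testBit_maskOf _ 6 (by norm_num),
          testBit_maskOf _ 7 (by norm_num),
          testBit_maskOf _ 8 (by norm_num)]
        simp [pvLetters, ite_not_and, ite_not,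
          show bitOfD "A" = 1 from by decide,
          show bitOfD "B" = 2 from by decide,
          show bitOfD "C" = 4 from by decide,
          show bitOfD "D" = 8 from by decide,
          show bitOfD "E" = 16 from by decide,
          show bitOfD "G" = 64 from by decide,
          show bitOfD "H" = 128 from by decide,
          show bitOfD "I" = 256 from by decide]
        ring
      · -- p = "G"
        simp only [pvLetters, List.getD_cons_zero, List.getD_cons_succ] at hx
        subst hx
        rw [count_patterns_from_go]
        simp only [hc1, if_false, hL1]
        simp only [PySem.Dict.ofList, PySem.Dict.update, List.foldl_cons, List.foldl_nil]
        rw [show ∀ (vA vB vC vD vE vF vG vH vI : List String),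
            ((((((((((PySem.Dict.empty.insert "A" vA).insert "B" vB).insert "C" vC).insert "D" vD).insert "E" vE).insert "F" vF).insert "G" vG).insert "H" vH).insert "I" vI).get? "G") = some vG from by
          intro vA vB vC vD vE vF vG vH vI
          simp [PySem.Dict.get?_insert]]
        rw [Option.getD_some, sum_ite_skip, hr]
        simp only [map_sum_ite_append, List.map_cons, List.map_nil, List.sum_cons, List.sum_nil]
        simp only [IHq "A" 0 (by decide),
          IHq "B" 1 (by decide),
          IHq "C" 2 (by decide),
          IHq "D" 3 (by decide),
          IHq "E" 4 (by decide),
          IHq "F" 5 (by decide),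
          IHq "H" 7 (by decide),
          IHq "I" 8 (by decide)]
        conv_rhs => rw [gspec]
        rw [show List.range 9 = [0, 1, 2, 3, 4, 5, 6, 7, 8] from by decide]
        simp only [List.map_cons, List.map_nil, List.sum_cons, List.sum_nil, trans9, midSpec,
          and_one_beq_zero, and_one_beq_one, Bool.and_true]
        simp only [testBit_maskOf _ 0 (by norm_num),
          testBit_maskOf _ 1 (by norm_num),
          testBit_maskOf _ 2 (by norm_num),
          testBit_maskOf _ 3 (by norm_num),
          testBit_maskOf _ 4 (by norm_num),
          testBit_maskOf _ 5 (by norm_num),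
          testBit_maskOf _ 6 (by norm_num),
          testBit_maskOf _ 7 (by norm_num),
          testBit_maskOf _ 8 (by norm_num)]
        simp [pvLetters, ite_not_and, ite_not,
          show bitOfD "A" = 1 from by decide,
          show bitOfD "B" = 2 from by decide,
          show bitOfD "C" = 4 from by decide,
          show bitOfD "D" = 8 from by decide,
          show bitOfD "E" = 16 from by decide,
          show bitOfD "F" = 32 from by decide,
          show bitOfD "H" = 128 from by decide,
          show bitOfD "I" = 256 from by decide]
        ring
      · -- p = "H"
        simp only [pvLetters, List.getD_cons_zero, List.getD_cons_succ] at hx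
        subst hx
        rw [count_patterns_from_go]
        simp only [hc1, if_false, hL1]
        simp only [PySem.Dict.ofList, PySem.Dict.update, List.foldl_cons, List.foldl_nil]
        rw [show ∀ (vA vB vC vD vE vF vG vH vI : List String),
            ((((((((((PySem.Dict.empty.insert "A" vA).insert "B" vB).insert "C" vC).insert "D" vD).insert "E" vE).insert "F" vF).insert "G" vG).insert "H" vH).insert "I" vI).get? "H") = some vH from by
          intro vA vB vC vD vE vF vG vH vI
          simp [PySem.Dict.get?_insert]]
        rw [Option.getD_some, sum_ite_skip, hr]
        simp only [map_sum_ite_append, List.map_cons, List.map_nil, List.sum_cons, List.sum_nil]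
        simp only [IHq "A" 0 (by decide),
          IHq "B" 1 (by decide),
          IHq "C" 2 (by decide),
          IHq "D" 3 (by decide),
          IHq "E" 4 (by decide),
          IHq "F" 5 (by decide),
          IHq "G" 6 (by decide),
          IHq "I" 8 (by decide)]
        conv_rhs => rw [gspec]
        rw [show List.range 9 = [0, 1, 2, 3, 4, 5, 6, 7, 8] from by decide]
        simp only [List.map_cons, List.map_nil, List.sum_cons, List.sum_nil, trans9, midSpec,
          and_one_beq_zero, and_one_beq_one, Bool.and_true]
        simp only [testBit_maskOf _ 0 (by norm_num),
          testBit_maskOf _ 1 (by norm_num),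
          testBit_maskOf _ 2 (by norm_num),
          testBit_maskOf _ 3 (by norm_num),
          testBit_maskOf _ 4 (by norm_num),
          testBit_maskOf _ 5 (by norm_num),
          testBit_maskOf _ 6 (by norm_num),
          testBit_maskOf _ 7 (by norm_num),
          testBit_maskOf _ 8 (by norm_num)]
        simp [pvLetters, ite_not_and, ite_not,
          show bitOfD "A" = 1 from by decide,
          show bitOfD "B" = 2 from by decide,
          show bitOfD "C" = 4 from by decide,
          show bitOfD "D" = 8 from by decide,
          show bitOfD "E" = 16 from by decide,
          show bitOfD "F" = 32 from by decide,
          show bitOfD "G" = 64 from by decide,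
          show bitOfD "I" = 256 from by decide]
        ring
      · -- p = "I"
        simp only [pvLetters, List.getD_cons_zero, List.getD_cons_succ] at hx
        subst hx
        rw [count_patterns_from_go]
        simp only [hc1, if_false, hL1]
        simp only [PySem.Dict.ofList, PySem.Dict.update, List.foldl_cons, List.foldl_nil]
        rw [show ∀ (vA vB vC vD vE vF vG vH vI : List String),
            ((((((((((PySem.Dict.empty.insert "A" vA).insert "B" vB).insert "C" vC).insert "D" vD).insert "E" vE).insert "F" vF).insert "G" vG).insert "H" vH).insert "I" vI).get? "I") = some vI from by
          intro vA vB vC vD vE vF vG vH vI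
          simp [PySem.Dict.get?_insert]]
        rw [Option.getD_some, sum_ite_skip, hr]
        simp only [map_sum_ite_append, List.map_cons, List.map_nil, List.sum_cons, List.sum_nil]
        simp only [IHq "A" 0 (by decide),
          IHq "B" 1 (by decide),
          IHq "C" 2 (by decide),
          IHq "D" 3 (by decide),
          IHq "E" 4 (by decide),
          IHq "F" 5 (by decide),
          IHq "G" 6 (by decide),
          IHq "H" 7 (by decide)]
        conv_rhs => rw [gspec]
        rw [show List.range 9 = [0, 1, 2, 3, 4, 5, 6, 7, 8] from by decide]
        simp only [List.map_cons, List.map_nil, List.sum_cons, List.sum_nil, trans9, midSpec,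
          and_one_beq_zero, and_one_beq_one, Bool.and_true]
        simp only [testBit_maskOf _ 0 (by norm_num),
          testBit_maskOf _ 1 (by norm_num),
          testBit_maskOf _ 2 (by norm_num),
          testBit_maskOf _ 3 (by norm_num),
          testBit_maskOf _ 4 (by norm_num),
          testBit_maskOf _ 5 (by norm_num),
          testBit_maskOf _ 6 (by norm_num),
          testBit_maskOf _ 7 (by norm_num),
          testBit_maskOf _ 8 (by norm_num)]
        simp [pvLetters, ite_not_and, ite_not,
          show bitOfD "A" = 1 from by decide,
          show bitOfD "B" = 2 from by decide,
          show bitOfD "C" = 4 from by decide,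
          show bitOfD "D" = 8 from by decide,
          show bitOfD "E" = 16 from by decide,
          show bitOfD "F" = 32 from by decide,
          show bitOfD "G" = 64 from by decide,
          show bitOfD "H" = 128 from by decide]
        ring

def ValidM (memo : PySem.Dict (Nat × Nat × Nat) Int) : Prop :=
  ∀ k v, memo.get? k = some v → v = gspec k.1 k.2.1 k.2.2

lemma solve_correct (rem : Nat) :
    ∀ (i m : Nat) (memo : PySem.Dict (Nat × Nat × Nat) Int), i < 9 → ValidM memo →
      (pvSolve rem i m memo).1 = gspec rem i m ∧ ValidM (pvSolve rem i m memo).2 := by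
  induction rem with
  | zero => intro i m memo hi hv; exact ⟨by simp [pvSolve, gspec], by simpa [pvSolve] using hv⟩
  | succ rem ih =>
    intro i m memo hi hv
    rw [pvSolve]
    cases hmemo : memo.get? (rem + 1, i, m) with
    | some v =>
      simp only []
      exact ⟨(hv _ _ hmemo).symm ▸ rfl, hv⟩
    | none =>
      simp only []
      -- inner fold lemma
      have fold : ∀ (l : List Nat), (∀ j ∈ l, j < 9) → ∀ (t : Int) (d), ValidM d →
          (l.foldl
            (fun (acc : Int × PySem.Dict (Nat × Nat × Nat) Int) j =>
              if (m >>> j) &&& 1 ≠ 0 then acc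
              else if (match pvMidD.get? (i, j) with
                       | some k => (m >>> k) &&& 1 == 0
                       | none => false) then acc
              else
                let r := pvSolve rem j (m ||| (1 <<< j)) acc.2
                (acc.1 + r.1, r.2)) (t, d)).1
            = t + ((l.map (fun j => if trans9 i j m then gspec rem j (m ||| (1 <<< j)) else 0)).sum)
          ∧ ValidM (l.foldl
            (fun (acc : Int × PySem.Dict (Nat × Nat × Nat) Int) j =>
              if (m >>> j) &&& 1 ≠ 0 then acc
              else if (match pvMidD.get? (i, j) with
                       | some k => (m >>> k) &&& 1 == 0
                       | none => false) then acc
              else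
                let r := pvSolve rem j (m ||| (1 <<< j)) acc.2
                (acc.1 + r.1, r.2)) (t, d)).2 := by
        intro l
        induction l with
        | nil => intro _ t d hd; simpa using hd
        | cons j tl ihl =>
          intro hl t d hd
          have hj9 : j < 9 := hl j (by simp)
          rw [List.foldl_cons, List.map_cons, List.sum_cons]
          by_cases g1 : (m >>> j) &&& 1 ≠ 0
          · have ht : trans9 i j m = false := by
              have : ((m >>> j) &&& 1 == 0) = false := beq_eq_false_iff_ne.mpr g1
              simp only [trans9, this, Bool.false_and]
            rw [if_pos g1, ht]
            have := ihl (fun a ha => hl a (by simp [ha])) t d hd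
            simpa using this
          · rw [if_neg g1]
            rw [pvMidD_eq i j hi hj9]
            by_cases g2 : (match midSpec i j with
                   | some k => (m >>> k) &&& 1 == 0
                   | none => false) = true
            · have ht : trans9 i j m = false := by
                cases hms : midSpec i j with
                | none => rw [hms] at g2; simp at g2
                | some k =>
                  rw [hms] at g2
                  have hg2 := beq_iff_eq.mp g2
                  have : ((m >>> k) &&& 1 == 1) = false := beq_eq_false_iff_ne.mpr (by omega)
                  simp only [trans9, hms, this, Bool.and_false]
              rw [if_pos g2, ht]
              have := ihl (fun a ha => hl a (by simp [ha])) t d hd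
              simpa using this
            · have ht : trans9 i j m = true := by
                have h1 : ((m >>> j) &&& 1 == 0) = true := beq_iff_eq.mpr (not_ne_iff.mp g1)
                cases hms : midSpec i j with
                | none => simp only [trans9, hms, h1, Bool.true_and]
                | some k =>
                  rw [hms] at g2
                  have hb : (m >>> k) &&& 1 ≤ 1 := Nat.and_le_right
                  have hne : (m >>> k) &&& 1 ≠ 0 := by
                    intro h0; exact g2 (beq_iff_eq.mpr h0)
                  have : ((m >>> k) &&& 1 == 1) = true := beq_iff_eq.mpr (by omega)
                  simp only [trans9, hms, h1, this, Bool.true_and]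
              rw [if_neg g2, ht]
              obtain ⟨hval, hvd⟩ := ih j (m ||| (1 <<< j)) d hj9 hd
              have := ihl (fun a ha => hl a (by simp [ha])) (t + (pvSolve rem j (m ||| 1 <<< j) d).1) (pvSolve rem j (m ||| 1 <<< j) d).2 hvd
              rw [if_pos rfl]
              constructor
              · rw [this.1, hval]; ring
              · exact this.2
      have hrange : ∀ j ∈ List.range 9, j < 9 := by intro j hj; simpa using List.mem_range.mp hj
      obtain ⟨h1, h2⟩ := fold (List.range 9) hrange 0 memo hv
      constructor
      · simp only [h1, zero_add, gspec]
      · intro k v hk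
        by_cases hkk : k = (rem + 1, i, m)
        · subst hkk
          rw [PySem.Dict.get?_insert_self] at hk
          injection hk with hk
          subst hk
          simp only [h1, zero_add, gspec]
        · rw [PySem.Dict.get?_insert_of_ne _ _ hkk] at hk
          exact h2 _ _ hk

lemma step_eq : (fun (m : Nat) (x : String) =>
      match pvIndexD.get? x with
      | some i => m ||| (1 <<< i)
      | none => m) = (fun m x => m ||| bitOfD x) := by
  funext m x
  cases h : pvIndexD.get? x <;> simp [bitOfD, h]

lemma validM_empty : ValidM PySem.Dict.empty := by
  intro k v h
  rw [PySem.Dict.get?_empty] at h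
  cases h

-- ===== VERDICT (by name: the statement is the Claim_ definition above) =====
theorem count_patterns_from_spec : Claim_equal_count_patterns_from := by
  unfold Claim_equal_count_patterns_from Spec_count_patterns_from
  intro fp L seq _hdom hpre
  unfold count_patterns_from count_patterns_from_alt
  by_cases hbig : L > 9 ∨ L < 1
  · rw [show (10 : Nat) = 9 + 1 from rfl, count_patterns_from_go]
    simp only [hbig, if_true]
  · by_cases h1 : L = 1
    · subst h1
      rw [show (10 : Nat) = 9 + 1 from rfl, count_patterns_from_go]
      norm_num
    · have hfp : fp ∈ pvLetters := hpre ⟨by omega, by omega⟩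
      simp only [pvLetters, List.mem_cons, List.not_mem_nil, or_false] at hfp
      rcases hfp with rfl | rfl | rfl | rfl | rfl | rfl | rfl | rfl | rfl
      · -- fp = "A"
        have hA := go_eq 10 L (seq.getD []) "A" 0 (by decide) (by omega) (by omega) (by omega)
        rw [hA]
        rw [if_neg hbig, if_neg h1]
        simp only [show (pvIndexD.get? "A").getD 0 = 0 from by decide]
        cases seq with
        | none =>
          simp only [Option.getD_none]
          rw [show maskOf ([] ++ ["A"]) = 1 <<< 0 from by decide]
          exact ((solve_correct (L - 1).toNat 0 (1 <<< 0) PySem.Dict.empty (by norm_num) validM_empty).1).symm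
        | some l =>
          simp only [Option.getD_some]
          rw [maskOf_append, show bitOfD "A" = 1 <<< 0 from by decide, step_eq, foldl_or_init,
            Nat.lor_comm]
          exact ((solve_correct (L - 1).toNat 0 (1 <<< 0 ||| maskOf l) PySem.Dict.empty (by norm_num) validM_empty).1).symm
      · -- fp = "B"
        have hA := go_eq 10 L (seq.getD []) "B" 1 (by decide) (by omega) (by omega) (by omega)
        rw [hA]
        rw [if_neg hbig, if_neg h1]
        simp only [show (pvIndexD.get? "B").getD 0 = 1 from by decide]
        cases seq with
        | none =>
          simp only [Option.getD_none]
          rw [show maskOf ([] ++ ["B"]) = 1 <<< 1 from by decide]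
          exact ((solve_correct (L - 1).toNat 1 (1 <<< 1) PySem.Dict.empty (by norm_num) validM_empty).1).symm
        | some l =>
          simp only [Option.getD_some]
          rw [maskOf_append, show bitOfD "B" = 1 <<< 1 from by decide, step_eq, foldl_or_init,
            Nat.lor_comm]
          exact ((solve_correct (L - 1).toNat 1 (1 <<< 1 ||| maskOf l) PySem.Dict.empty (by norm_num) validM_empty).1).symm
      · -- fp = "C"
        have hA := go_eq 10 L (seq.getD []) "C" 2 (by decide) (by omega) (by omega) (by omega)
        rw [hA]
        rw [if_neg hbig, if_neg h1]
        simp only [show (pvIndexD.get? "C").getD 0 = 2 from by decide]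
        cases seq with
        | none =>
          simp only [Option.getD_none]
          rw [show maskOf ([] ++ ["C"]) = 1 <<< 2 from by decide]
          exact ((solve_correct (L - 1).toNat 2 (1 <<< 2) PySem.Dict.empty (by norm_num) validM_empty).1).symm
        | some l =>
          simp only [Option.getD_some]
          rw [maskOf_append, show bitOfD "C" = 1 <<< 2 from by decide, step_eq, foldl_or_init,
            Nat.lor_comm]
          exact ((solve_correct (L - 1).toNat 2 (1 <<< 2 ||| maskOf l) PySem.Dict.empty (by norm_num) validM_empty).1).symm
      · -- fp = "D"
        have hA := go_eq 10 L (seq.getD []) "D" 3 (by decide) (by omega) (by omega) (by omega)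
        rw [hA]
        rw [if_neg hbig, if_neg h1]
        simp only [show (pvIndexD.get? "D").getD 0 = 3 from by decide]
        cases seq with
        | none =>
          simp only [Option.getD_none]
          rw [show maskOf ([] ++ ["D"]) = 1 <<< 3 from by decide]
          exact ((solve_correct (L - 1).toNat 3 (1 <<< 3) PySem.Dict.empty (by norm_num) validM_empty).1).symm
        | some l =>
          simp only [Option.getD_some]
          rw [maskOf_append, show bitOfD "D" = 1 <<< 3 from by decide, step_eq, foldl_or_init,
            Nat.lor_comm]
          exact ((solve_correct (L - 1).toNat 3 (1 <<< 3 ||| maskOf l) PySem.Dict.empty (by norm_num) validM_empty).1).symm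
      · -- fp = "E"
        have hA := go_eq 10 L (seq.getD []) "E" 4 (by decide) (by omega) (by omega) (by omega)
        rw [hA]
        rw [if_neg hbig, if_neg h1]
        simp only [show (pvIndexD.get? "E").getD 0 = 4 from by decide]
        cases seq with
        | none =>
          simp only [Option.getD_none]
          rw [show maskOf ([] ++ ["E"]) = 1 <<< 4 from by decide]
          exact ((solve_correct (L - 1).toNat 4 (1 <<< 4) PySem.Dict.empty (by norm_num) validM_empty).1).symm
        | some l =>
          simp only [Option.getD_some]
          rw [maskOf_append, show bitOfD "E" = 1 <<< 4 from by decide, step_eq, foldl_or_init,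
            Nat.lor_comm]
          exact ((solve_correct (L - 1).toNat 4 (1 <<< 4 ||| maskOf l) PySem.Dict.empty (by norm_num) validM_empty).1).symm
      · -- fp = "F"
        have hA := go_eq 10 L (seq.getD []) "F" 5 (by decide) (by omega) (by omega) (by omega)
        rw [hA]
        rw [if_neg hbig, if_neg h1]
        simp only [show (pvIndexD.get? "F").getD 0 = 5 from by decide]
        cases seq with
        | none =>
          simp only [Option.getD_none]
          rw [show maskOf ([] ++ ["F"]) = 1 <<< 5 from by decide]
          exact ((solve_correct (L - 1).toNat 5 (1 <<< 5) PySem.Dict.empty (by norm_num) validM_empty).1).symm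
        | some l =>
          simp only [Option.getD_some]
          rw [maskOf_append, show bitOfD "F" = 1 <<< 5 from by decide, step_eq, foldl_or_init,
            Nat.lor_comm]
          exact ((solve_correct (L - 1).toNat 5 (1 <<< 5 ||| maskOf l) PySem.Dict.empty (by norm_num) validM_empty).1).symm
      · -- fp = "G"
        have hA := go_eq 10 L (seq.getD []) "G" 6 (by decide) (by omega) (by omega) (by omega)
        rw [hA]
        rw [if_neg hbig, if_neg h1]
        simp only [show (pvIndexD.get? "G").getD 0 = 6 from by decide]
        cases seq with
        | none =>
          simp only [Option.getD_none]
          rw [show maskOf ([] ++ ["G"]) = 1 <<< 6 from by decide]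
          exact ((solve_correct (L - 1).toNat 6 (1 <<< 6) PySem.Dict.empty (by norm_num) validM_empty).1).symm
        | some l =>
          simp only [Option.getD_some]
          rw [maskOf_append, show bitOfD "G" = 1 <<< 6 from by decide, step_eq, foldl_or_init,
            Nat.lor_comm]
          exact ((solve_correct (L - 1).toNat 6 (1 <<< 6 ||| maskOf l) PySem.Dict.empty (by norm_num) validM_empty).1).symm
      · -- fp = "H"
        have hA := go_eq 10 L (seq.getD []) "H" 7 (by decide) (by omega) (by omega) (by omega)
        rw [hA]
        rw [if_neg hbig, if_neg h1]
        simp only [show (pvIndexD.get? "H").getD 0 = 7 from by decide]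
        cases seq with
        | none =>
          simp only [Option.getD_none]
          rw [show maskOf ([] ++ ["H"]) = 1 <<< 7 from by decide]
          exact ((solve_correct (L - 1).toNat 7 (1 <<< 7) PySem.Dict.empty (by norm_num) validM_empty).1).symm
        | some l =>
          simp only [Option.getD_some]
          rw [maskOf_append, show bitOfD "H" = 1 <<< 7 from by decide, step_eq, foldl_or_init,
            Nat.lor_comm]
          exact ((solve_correct (L - 1).toNat 7 (1 <<< 7 ||| maskOf l) PySem.Dict.empty (by norm_num) validM_empty).1).symm
      · -- fp = "I"
        have hA := go_eq 10 L (seq.getD []) "I" 8 (by decide) (by omega) (by omega) (by omega)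
        rw [hA]
        rw [if_neg hbig, if_neg h1]
        simp only [show (pvIndexD.get? "I").getD 0 = 8 from by decide]
        cases seq with
        | none =>
          simp only [Option.getD_none]
          rw [show maskOf ([] ++ ["I"]) = 1 <<< 8 from by decide]
          exact ((solve_correct (L - 1).toNat 8 (1 <<< 8) PySem.Dict.empty (by norm_num) validM_empty).1).symm
        | some l =>
          simp only [Option.getD_some]
          rw [maskOf_append, show bitOfD "I" = 1 <<< 8 from by decide, step_eq, foldl_or_init,
            Nat.lor_comm]
          exact ((solve_correct (L - 1).toNat 8 (1 <<< 8 ||| maskOf l) PySem.Dict.empty (by norm_num) validM_empty).1).symm
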